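-- pv_equiv track=rewrite | github.com/StephanGuingor/TICTAC | MemoryGameGUI.py | set_board
-- ===== SOURCE A (Python) =====
-- def set_board(size):
--     board = []
--     i=-1
--     for element in range(size):
--         i =0
--         board += [[str(i)]]
--     for element in range(size):
--         i+=1
--         for element in range(size):
--             board[element] += str(i)
--     return board
-- ===== SOURCE B (Python) =====
-- def set_board(size):
--     row = ['0']
--     for i in range(1, size + 1):
--         row += str(i)
--     return [list(row) for _ in range(size)]
-- ===== Notes on version B (the rewrite author's own statement) =====
-- stated objective: simpler
-- what changed: B builds the per-row digit sequence once with a single linear loop and replicates it size times, instead of A's nested column-wise pass that appends str(i) character-wise to every row for every i.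
import Mathlib
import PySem

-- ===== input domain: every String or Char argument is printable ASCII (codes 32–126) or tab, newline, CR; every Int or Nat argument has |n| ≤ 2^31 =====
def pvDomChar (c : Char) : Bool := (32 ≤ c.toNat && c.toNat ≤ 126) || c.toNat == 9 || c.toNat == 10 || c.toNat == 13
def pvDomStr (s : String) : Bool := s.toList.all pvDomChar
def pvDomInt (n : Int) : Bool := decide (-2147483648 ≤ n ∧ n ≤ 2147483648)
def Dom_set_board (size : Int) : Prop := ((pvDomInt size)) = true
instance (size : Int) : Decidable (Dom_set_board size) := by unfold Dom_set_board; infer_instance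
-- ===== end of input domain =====

-- B builds the row of digit-strings once and replicates it; A builds all rows in a nested column-wise pass.

-- ===== PORT A =====
def set_board (size : Int) : List (List String) :=
  ((PySem.List.pyRange 0 size 1).foldl
    (fun (p : List (List String) × Int) (_ : Int) =>
      ((PySem.List.pyRange 0 size 1).foldl
        (fun (b : List (List String)) (element : Int) =>
          PySem.List.pySetD b element
            (PySem.List.pyGetD b element [] ++
              (PySem.Int.toStr (p.2 + 1)).toList.map (fun c => String.ofList [c])))
        p.1,
       p.2 + 1))
    ((PySem.List.pyRange 0 size 1).foldl
      (fun (p : List (List String) × Int) (_ : Int) =>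
        (p.1 ++ [[PySem.Int.toStr 0]], 0))
      ([], -1))).1

-- ===== PORT B =====
def set_board_alt (size : Int) : List (List String) :=
  (PySem.List.pyRange 0 size 1).map (fun _ =>
    (PySem.List.pyRange 1 (size + 1) 1).foldl
      (fun (r : List String) (i : Int) =>
        r ++ (PySem.Int.toStr i).toList.map (fun c => String.ofList [c]))
      ["0"])

-- ===== PRECONDITION & SPEC =====
def Spec_set_board (size : Int) (out : List (List String)) : Prop := out = set_board_alt size
instance (size : Int) (out : List (List String)) : Decidable (Spec_set_board size out) := by unfold Spec_set_board; infer_instance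

-- ===== CLAIM (what is proved, stated in full; the proofs are below) =====
def Claim_equal_set_board : Prop := ∀ (size : Int), Dom_set_board size → Spec_set_board size (set_board size)

-- ===== LEMMAS AND PROOFS =====

-- digit-string append step (proof-side abbreviation of the shared lambda)
def pvDig (j : Int) : List String := (PySem.Int.toStr j).toList.map (fun c => String.ofList [c])

-- setting/appending at index k+1 on a cons list leaves the head alone
theorem pv_set_cons (s : List String) :
    ∀ (l : List Nat) (x : List String) (bs : List (List String)),
      l.foldl (fun b k => b.set (k+1) (b.getD (k+1) [] ++ s)) (x :: bs)
        = x :: l.foldl (fun b k => b.set k (b.getD k [] ++ s)) bs := by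
  intro l
  induction l with
  | nil => intro x bs; rfl
  | cons a t ih =>
      intro x bs
      simp only [List.foldl_cons, List.set_cons_succ, List.getD_cons_succ]
      exact ih x _

-- the inner column loop over all indices appends s to every row
theorem pv_mapAppend (s : List String) :
    ∀ (b : List (List String)),
      (List.range b.length).foldl (fun b k => b.set k (b.getD k [] ++ s)) b = b.map (· ++ s) := by
  intro b
  induction b with
  | nil => rfl
  | cons x bs ih =>
      rw [List.length_cons, List.range_succ_eq_map]
      simp only [List.foldl_cons, List.foldl_map, List.set_cons_zero, List.getD_cons_zero,
        Nat.succ_eq_add_one, List.map_cons]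
      rw [pv_set_cons, ih]

theorem pv_inner (size : Int) (s : List String) (b : List (List String))
    (hb : (b.length : Int) = size) :
    (PySem.List.pyRange 0 size 1).foldl
      (fun (b : List (List String)) (element : Int) =>
        PySem.List.pySetD b element (PySem.List.pyGetD b element [] ++ s)) b
      = b.map (· ++ s) := by
  rw [PySem.List.pyRange_one, List.foldl_map]
  have h1 : (size - 0).toNat = b.length := by omega
  rw [h1]
  have h2 : ∀ (bb : List (List String)) (k : Nat),
      PySem.List.pySetD bb ((0:Int) + k) (PySem.List.pyGetD bb ((0:Int) + k) [] ++ s)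
        = bb.set k (bb.getD k [] ++ s) := by
    intro bb k
    simp [PySem.List.pySetD_natCast, PySem.List.pyGetD_natCast]
  have hf : (fun (bb : List (List String)) (k : Nat) =>
      PySem.List.pySetD bb ((0:Int) + k) (PySem.List.pyGetD bb ((0:Int) + k) [] ++ s))
        = (fun bb k => bb.set k (bb.getD k [] ++ s)) := by
    funext bb k; exact h2 bb k
  rw [hf]
  exact pv_mapAppend s b

-- the first loop of A builds a board of "0" rows and sets i to 0
theorem pv_first :
    ∀ (l : List Int) (b : List (List String)),
      l.foldl (fun (p : List (List String) × Int) (_ : Int) => (p.1 ++ [[PySem.Int.toStr 0]], (0:Int)))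
        (b, 0)
        = (b ++ List.replicate l.length [PySem.Int.toStr 0], 0) := by
  intro l
  induction l with
  | nil => intro b; simp
  | cons a t ih =>
      intro b
      simp only [List.foldl_cons, List.length_cons]
      rw [ih]
      simp [List.replicate_succ]

-- A's outer loop on a board of n equal rows keeps the rows equal, appending digits of i+1, i+2, …
theorem pv_outer (size : Int) (n : Nat) (hn : (n : Int) = size) :
    ∀ (l : List Int) (r : List String) (i : Int),
      (l.foldl
        (fun (p : List (List String) × Int) (_ : Int) =>
          ((PySem.List.pyRange 0 size 1).foldl
            (fun (b : List (List String)) (element : Int) =>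
              PySem.List.pySetD b element
                (PySem.List.pyGetD b element [] ++ pvDig (p.2 + 1))) p.1,
           p.2 + 1))
        (List.replicate n r, i)).1
        = List.replicate n
            ((PySem.List.pyRange (i + 1) (i + 1 + l.length) 1).foldl
              (fun (rr : List String) (j : Int) => rr ++ pvDig j) r) := by
  intro l
  induction l with
  | nil =>
      intro r i
      simp [PySem.List.pyRange_one_eq_nil]
  | cons a t ih =>
      intro r i
      simp only [List.foldl_cons]
      have hlen : ((List.replicate n r).length : Int) = size := by simp [hn]
      rw [pv_inner size (pvDig (i + 1)) (List.replicate n r) hlen, List.map_replicate]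
      rw [ih (r ++ pvDig (i + 1)) (i + 1)]
      have hcons : PySem.List.pyRange (i + 1) (i + 1 + ((a :: t).length : Int)) 1
          = (i + 1) :: PySem.List.pyRange (i + 1 + 1) (i + 1 + ((a :: t).length : Int)) 1 :=
        PySem.List.pyRange_one_cons (by simp only [List.length_cons, Nat.cast_add, Nat.cast_one]; omega)
      rw [hcons, List.foldl_cons]
      have he : i + 1 + 1 + (t.length : Int) = i + 1 + ((a :: t).length : Int) := by
        simp; ring
      rw [he]

-- the whole first loop, from the initial state ([], -1)
theorem pv_first0 (size : Int) (hpos : 0 < size) :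
    (PySem.List.pyRange 0 size 1).foldl
      (fun (p : List (List String) × Int) (_ : Int) => (p.1 ++ [[PySem.Int.toStr 0]], (0:Int)))
      ([], -1)
      = (List.replicate size.toNat [PySem.Int.toStr 0], 0) := by
  rw [PySem.List.pyRange_one_cons hpos]
  simp only [List.foldl_cons, List.nil_append]
  rw [pv_first]
  have hlen : (PySem.List.pyRange 1 size 1).length + 1 = size.toNat := by
    rw [PySem.List.length_pyRange_one]; omega
  rw [← hlen]
  simp [List.replicate_succ]

theorem set_board_spec : Claim_equal_set_board := by
  intro size _
  unfold Spec_set_board set_board set_board_alt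
  by_cases hpos : 0 < size
  · rw [pv_first0 size hpos]
    have hmain := pv_outer size size.toNat (by omega) (PySem.List.pyRange 0 size 1) [PySem.Int.toStr 0] 0
    simp only [pvDig] at hmain
    rw [hmain]
    have hend : ((0:Int) + 1 + ((PySem.List.pyRange 0 size 1).length : Int)) = size + 1 := by
      rw [PySem.List.length_pyRange_one]; omega
    rw [hend, show ((0:Int) + 1) = 1 from by norm_num,
      show PySem.Int.toStr 0 = "0" from rfl]
    rw [List.map_const', PySem.List.length_pyRange_one]
    have hnn : (size - 0).toNat = size.toNat := by omega
    rw [hnn]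
  · have h0 : PySem.List.pyRange 0 size 1 = [] := PySem.List.pyRange_one_eq_nil (by omega)
    simp [h0]
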